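-- pv_equiv track=rewrite | github.com/msbizrise-arch/PW-Extractors | Extractor/modules/SPpw.py | convert_cdn
-- ===== SOURCE A (Python) =====
-- def convert_cdn(url):
--     """Convert to CDN link"""
--     if not url:
--         return url
--
--     replacements = {
--         "d1d34p8vz63oiq.cloudfront.net": "d26g5bnklkwsh4.cloudfront.net",
--         "d2bps9p1kber4v.cloudfront.net": "d26g5bnklkwsh4.cloudfront.net",
--         "d3cvwyf9ksu0h5.cloudfront.net": "d26g5bnklkwsh4.cloudfront.net",
--         "d1kwv1j9v54g2g.cloudfront.net": "d26g5bnklkwsh4.cloudfront.net",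
--     }
--
--     for old, new in replacements.items():
--         url = url.replace(old, new)
--
--     return url.strip()
-- ===== SOURCE B (Python) =====
-- def convert_cdn(url):
--     """Convert to CDN link"""
--     if not url:
--         return url
--
--     NEW = "d26g5bnklkwsh4.cloudfront.net"
--     OLD = ("d1d34p8vz63oiq.cloudfront.net",
--            "d2bps9p1kber4v.cloudfront.net",
--            "d3cvwyf9ksu0h5.cloudfront.net",
--            "d1kwv1j9v54g2g.cloudfront.net")
--
--     parts = []
--     i = 0
--     n = len(url)
--     while i < n:
--         if url.startswith(OLD, i):
--             parts.append(NEW)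
--             i += len(NEW)
--         else:
--             parts.append(url[i])
--             i += 1
--     return "".join(parts).strip()
-- ===== Notes on version B (the rewrite author's own statement) =====
-- stated objective: alternative
-- what changed: A runs four sequential full-string replace passes (one per old hostname); B makes a single left-to-right scan that tests all four old hostnames at each position and emits the canonical hostname on a match, proved equal because the hostnames never overlap each other or the replacement.
import Mathlib
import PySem

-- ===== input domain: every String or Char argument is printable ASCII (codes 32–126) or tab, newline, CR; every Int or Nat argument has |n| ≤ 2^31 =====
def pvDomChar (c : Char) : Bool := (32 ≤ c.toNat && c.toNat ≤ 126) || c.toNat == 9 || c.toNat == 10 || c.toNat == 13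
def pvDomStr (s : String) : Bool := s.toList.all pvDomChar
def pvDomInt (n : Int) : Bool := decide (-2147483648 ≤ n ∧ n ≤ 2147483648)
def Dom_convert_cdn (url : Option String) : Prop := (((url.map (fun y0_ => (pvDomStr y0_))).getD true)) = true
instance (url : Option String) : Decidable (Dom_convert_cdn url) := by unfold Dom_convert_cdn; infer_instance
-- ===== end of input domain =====

-- B replaces A's four sequential full-string replace passes by ONE left-to-right scan that
-- matches any of the four old hostnames at each position (objective: alternative single-pass
-- algorithm, same asymptotic cost).

-- ===== PORT A =====
-- the dict literal's .items(), in insertion order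
def cdnReplacements : List (String × String) :=
  [("d1d34p8vz63oiq.cloudfront.net", "d26g5bnklkwsh4.cloudfront.net"),
   ("d2bps9p1kber4v.cloudfront.net", "d26g5bnklkwsh4.cloudfront.net"),
   ("d3cvwyf9ksu0h5.cloudfront.net", "d26g5bnklkwsh4.cloudfront.net"),
   ("d1kwv1j9v54g2g.cloudfront.net", "d26g5bnklkwsh4.cloudfront.net")]

def convert_cdn (url : Option String) : Option String :=
  match url with
  | none => none                                  -- 'if not url: return url'
  | some s =>
    if s = "" then some s                         -- '' is falsy too
    else
      let s := cdnReplacements.foldl (fun u p => PySem.Str.replace u p.1 p.2) s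
      some (PySem.Str.strip s)

-- ===== PORT B =====
def cdnNew : List Char := "d26g5bnklkwsh4.cloudfront.net".toList
def cdnOlds : List (List Char) :=
  ["d1d34p8vz63oiq.cloudfront.net".toList,
   "d2bps9p1kber4v.cloudfront.net".toList,
   "d3cvwyf9ksu0h5.cloudfront.net".toList,
   "d1kwv1j9v54g2g.cloudfront.net".toList]

-- Source B's while loop: at each position, startswith(OLD, i) in tuple order; emit NEW and skip
-- len(NEW) chars on a match, else copy one char ('i += 1' = recursing on the tail).
def scanCdn : List Char → List Char
  | [] => []
  | c :: t =>
    if cdnOlds.any (fun o => o.isPrefixOf (c :: t)) then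
      cdnNew ++ scanCdn (t.drop (cdnNew.length - 1))
    else
      c :: scanCdn t
termination_by s => s.length
decreasing_by
  · simp only [List.length_drop, List.length_cons]; omega
  · simp only [List.length_cons]; omega

def convert_cdn_alt (url : Option String) : Option String :=
  match url with
  | none => none
  | some s =>
    if s = "" then some s
    else some (PySem.Str.strip (String.ofList (scanCdn s.toList)))

-- ===== PRECONDITION & SPEC =====
def Spec_convert_cdn (url : Option String) (out : Option String) : Prop := out = convert_cdn_alt url
instance (url : Option String) (out : Option String) : Decidable (Spec_convert_cdn url out) := by unfold Spec_convert_cdn; infer_instance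

-- ===== CLAIM (what is proved, stated in full; the proofs are below) =====
def Claim_equal_convert_cdn : Prop := ∀ (url : Option String), Dom_convert_cdn url → Spec_convert_cdn url (convert_cdn url)

-- ===== LEMMAS AND PROOFS =====

-- One-pattern greedy replace, as a plain recursion on the list (= Chars.replace for old ≠ []).
def rep1 (old rep : List Char) : List Char → List Char
  | [] => []
  | c :: t =>
    if old.isPrefixOf (c :: t) then rep ++ rep1 old rep (t.drop (old.length - 1))
    else c :: rep1 old rep t
termination_by s => s.length
decreasing_by
  · simp only [List.length_drop, List.length_cons]; omega
  · simp only [List.length_cons]; omega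

theorem rep1_prefix (old rep : List Char) (hold : old ≠ []) (s : List Char)
    (h : old <+: s) : rep1 old rep s = rep ++ rep1 old rep (s.drop old.length) := by
  cases s with
  | nil => exact absurd (List.prefix_nil.mp h) hold
  | cons c t =>
    rw [rep1, if_pos (List.isPrefixOf_iff_prefix.mpr h)]
    obtain ⟨k, hk⟩ : ∃ k, old.length = k + 1 := by
      cases ho : old.length with
      | zero => exact absurd (List.length_eq_zero_iff.mp ho) hold
      | succ k => exact ⟨k, rfl⟩
    rw [hk]; simp [List.drop_succ_cons]

theorem rep1_cons_neg (old rep : List Char) (c : Char) (t : List Char)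
    (h : ¬ old <+: (c :: t)) : rep1 old rep (c :: t) = c :: rep1 old rep t := by
  rw [rep1, if_neg (fun hp => h (List.isPrefixOf_iff_prefix.mp hp))]

theorem replace_go_spec (old rep : List Char) (hold : old ≠ []) :
    ∀ fuel l acc, l.length ≤ fuel →
      PySem.Chars.replace.go old rep fuel l acc = acc.reverse ++ rep1 old rep l := by
  intro fuel
  induction fuel with
  | zero =>
    intro l acc hl
    have : l = [] := List.length_eq_zero_iff.mp (Nat.le_zero.mp hl)
    subst this; simp [PySem.Chars.replace.go, rep1]
  | succ n ih =>
    intro l acc hl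
    cases l with
    | nil => simp [PySem.Chars.replace.go, rep1]
    | cons c t =>
      rw [PySem.Chars.replace.go]
      by_cases hp : old.isPrefixOf (c :: t)
      · rw [if_pos hp]
        have hdec : (List.drop old.length (c :: t)).length ≤ n := by
          have : 1 ≤ old.length := by
            cases ho : old.length with
            | zero => exact absurd (List.length_eq_zero_iff.mp ho) hold
            | succ k => omega
          simp only [List.length_drop, List.length_cons]
          simp only [List.length_cons] at hl
          omega
        rw [ih _ _ hdec,
            rep1_prefix old rep hold (c :: t) (List.isPrefixOf_iff_prefix.mp hp)]
        simp
      · rw [if_neg hp, ih t (c :: acc) (by simp at hl ⊢; omega),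
            rep1_cons_neg old rep c t (fun h => hp (List.isPrefixOf_iff_prefix.mpr h))]
        simp

theorem replace_eq_rep1 (s old rep : List Char) (hold : old ≠ []) :
    PySem.Chars.replace s old rep = rep1 old rep s := by
  rw [PySem.Chars.replace, if_neg (by simp [List.isEmpty_iff, hold]),
      replace_go_spec old rep hold s.length s [] (le_refl _)]
  simp

-- Distribution: a block 'a' that can neither contain a match of 'old' starting inside it nor
-- be extended into one lets rep1 pass over it unchanged.
theorem rep1_append_clean (old rep : List Char) :
    ∀ a, (∀ k, k < a.length → ¬ (a.drop k <+: old) ∧ ¬ (old <+: a.drop k)) →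
      ∀ u, rep1 old rep (a ++ u) = a ++ rep1 old rep u := by
  intro a
  induction a with
  | nil => intro _ u; simp
  | cons c a' ih =>
    intro hC u
    have hnp : ¬ old <+: (c :: a') ++ u := by
      intro hpre
      rcases List.prefix_or_prefix_of_prefix hpre (List.prefix_append (c :: a') u) with h | h
      · exact (hC 0 (by simp)).2 h
      · exact (hC 0 (by simp)).1 h
    have := rep1_cons_neg old rep c (a' ++ u) (by simpa using hnp)
    simp only [List.cons_append] at this ⊢
    rw [this, ih (fun k hk => by simpa using hC (k + 1) (by simpa using hk)) u]

-- A pattern tail that survives rep1 was already there: no nonempty proper tail of 'pat' is a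
-- prefix of 'rep', so matches of 'pat' in the output (off the head) come from the input.
theorem rep1_drop_prefix (old rep pat : List Char)
    (hlp : pat.length ≤ rep.length)
    (hnov : ∀ j, 1 ≤ j → j < pat.length → ¬ (pat.drop j <+: rep)) :
    ∀ t j, 1 ≤ j → pat.drop j <+: rep1 old rep t → pat.drop j <+: t := by
  intro t
  induction t using rep1.induct old with
  | case1 =>
    intro j _ h
    simpa [rep1] using h
  | case2 c t hp _ =>
    intro j hj h
    by_cases hjl : pat.length ≤ j
    · simp [List.drop_eq_nil_of_le hjl]
    · rw [Nat.not_le] at hjl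
      rw [rep1, if_pos hp] at h
      have hlen : (pat.drop j).length ≤ rep.length := by
        simp only [List.length_drop]; omega
      exact absurd ((List.isPrefix_append_of_length hlen).mp h) (hnov j hj hjl)
  | case3 c t hp ih =>
    intro j hj h
    by_cases hjl : pat.length ≤ j
    · simp [List.drop_eq_nil_of_le hjl]
    · rw [Nat.not_le] at hjl
      rw [rep1, if_neg hp] at h
      rw [List.drop_eq_getElem_cons hjl] at h ⊢
      obtain ⟨hc, htl⟩ := List.cons_prefix_cons.mp h
      exact List.cons_prefix_cons.mpr ⟨hc, ih (j + 1) (by omega) htl⟩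

theorem not_prefix_cons_rep1 (old rep pat : List Char)
    (hlp : pat.length ≤ rep.length)
    (hnov : ∀ j, 1 ≤ j → j < pat.length → ¬ (pat.drop j <+: rep)) (c : Char) (t : List Char) (h : ¬ pat <+: c :: t) :
    ¬ pat <+: c :: rep1 old rep t := by
  intro hp
  cases pat with
  | nil => exact h (List.nil_prefix)
  | cons p0 pr =>
    obtain ⟨hc, htl⟩ := List.cons_prefix_cons.mp hp
    have h1 : (p0 :: pr).drop 1 <+: rep1 old rep t := by simpa using htl
    have := rep1_drop_prefix old rep (p0 :: pr) hlp hnov t 1 (le_refl _) h1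
    exact h (List.cons_prefix_cons.mpr ⟨hc, by simpa using this⟩)

-- shorthands for the four old hosts
def oldA : List Char := "d1d34p8vz63oiq.cloudfront.net".toList
def oldB : List Char := "d2bps9p1kber4v.cloudfront.net".toList
def oldC : List Char := "d3cvwyf9ksu0h5.cloudfront.net".toList
def oldD : List Char := "d1kwv1j9v54g2g.cloudfront.net".toList

theorem cdnOlds_eq : cdnOlds = [oldA, oldB, oldC, oldD] := rfl

-- clean-block side conditions, all decidable facts about the five concrete 29-char hostnames
theorem clean_new_B : ∀ k, k < cdnNew.length → ¬ (cdnNew.drop k <+: oldB) ∧ ¬ (oldB <+: cdnNew.drop k) := by decide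
theorem clean_new_C : ∀ k, k < cdnNew.length → ¬ (cdnNew.drop k <+: oldC) ∧ ¬ (oldC <+: cdnNew.drop k) := by decide
theorem clean_new_D : ∀ k, k < cdnNew.length → ¬ (cdnNew.drop k <+: oldD) ∧ ¬ (oldD <+: cdnNew.drop k) := by decide
theorem clean_B_A : ∀ k, k < oldB.length → ¬ (oldB.drop k <+: oldA) ∧ ¬ (oldA <+: oldB.drop k) := by decide
theorem clean_C_A : ∀ k, k < oldC.length → ¬ (oldC.drop k <+: oldA) ∧ ¬ (oldA <+: oldC.drop k) := by decide
theorem clean_C_B : ∀ k, k < oldC.length → ¬ (oldC.drop k <+: oldB) ∧ ¬ (oldB <+: oldC.drop k) := by decide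
theorem clean_D_A : ∀ k, k < oldD.length → ¬ (oldD.drop k <+: oldA) ∧ ¬ (oldA <+: oldD.drop k) := by decide
theorem clean_D_B : ∀ k, k < oldD.length → ¬ (oldD.drop k <+: oldB) ∧ ¬ (oldB <+: oldD.drop k) := by decide
theorem clean_D_C : ∀ k, k < oldD.length → ¬ (oldD.drop k <+: oldC) ∧ ¬ (oldC <+: oldD.drop k) := by decide
theorem nov_B : ∀ j, 1 ≤ j → j < oldB.length → ¬ (oldB.drop j <+: cdnNew) := by decide
theorem nov_C : ∀ j, 1 ≤ j → j < oldC.length → ¬ (oldC.drop j <+: cdnNew) := by decide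
theorem nov_D : ∀ j, 1 ≤ j → j < oldD.length → ¬ (oldD.drop j <+: cdnNew) := by decide

theorem oldA_ne : oldA ≠ [] := by decide
theorem oldB_ne : oldB ≠ [] := by decide
theorem oldC_ne : oldC ≠ [] := by decide
theorem oldD_ne : oldD ≠ [] := by decide
theorem lenB : oldB.length ≤ cdnNew.length := by decide
theorem lenC : oldC.length ≤ cdnNew.length := by decide
theorem lenD : oldD.length ≤ cdnNew.length := by decide

-- the composition of the four sequential replaces equals B's single scan
set_option maxHeartbeats 1000000 in
theorem scan_eq : ∀ s, rep1 oldD cdnNew (rep1 oldC cdnNew (rep1 oldB cdnNew (rep1 oldA cdnNew s))) = scanCdn s := by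
  intro s
  induction s using scanCdn.induct with
  | case1 => simp [rep1, scanCdn]
  | case2 c t hany ih =>
    rw [scanCdn, if_pos hany]
    rw [cdnOlds_eq] at hany
    simp only [List.any_cons, List.any_nil, Bool.or_false, Bool.or_eq_true,
      List.isPrefixOf_iff_prefix] at hany
    have hdrop : ∀ o : List Char, o.length = 29 →
        (c :: t).drop o.length = t.drop (cdnNew.length - 1) := by
      intro o ho; rw [ho]; rfl
    by_cases hA : oldA <+: (c :: t)
    · rw [rep1_prefix oldA cdnNew oldA_ne _ hA, hdrop oldA (by decide),
          rep1_append_clean oldB cdnNew cdnNew clean_new_B,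
          rep1_append_clean oldC cdnNew cdnNew clean_new_C,
          rep1_append_clean oldD cdnNew cdnNew clean_new_D, ih]
    · by_cases hB : oldB <+: (c :: t)
      · have hs : c :: t = oldB ++ (c :: t).drop oldB.length := by
          conv_lhs => rw [← List.take_append_drop oldB.length (c :: t)]
          rw [← List.prefix_iff_eq_take.mp hB]
        rw [hs, rep1_append_clean oldA cdnNew oldB clean_B_A,
            rep1_prefix oldB cdnNew oldB_ne _ (List.prefix_append _ _), List.drop_left,
            rep1_append_clean oldC cdnNew cdnNew clean_new_C,
            rep1_append_clean oldD cdnNew cdnNew clean_new_D,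
            hdrop oldB (by decide), ih]
      · by_cases hC : oldC <+: (c :: t)
        · have hs : c :: t = oldC ++ (c :: t).drop oldC.length := by
            conv_lhs => rw [← List.take_append_drop oldC.length (c :: t)]
            rw [← List.prefix_iff_eq_take.mp hC]
          rw [hs, rep1_append_clean oldA cdnNew oldC clean_C_A,
              rep1_append_clean oldB cdnNew oldC clean_C_B,
              rep1_prefix oldC cdnNew oldC_ne _ (List.prefix_append _ _), List.drop_left,
              rep1_append_clean oldD cdnNew cdnNew clean_new_D,
              hdrop oldC (by decide), ih]
        · have hD : oldD <+: (c :: t) := by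
            rcases hany with h | h | h | h
            exacts [absurd h hA, absurd h hB, absurd h hC, h]
          have hs : c :: t = oldD ++ (c :: t).drop oldD.length := by
            conv_lhs => rw [← List.take_append_drop oldD.length (c :: t)]
            rw [← List.prefix_iff_eq_take.mp hD]
          rw [hs, rep1_append_clean oldA cdnNew oldD clean_D_A,
              rep1_append_clean oldB cdnNew oldD clean_D_B,
              rep1_append_clean oldC cdnNew oldD clean_D_C,
              rep1_prefix oldD cdnNew oldD_ne _ (List.prefix_append _ _), List.drop_left,
              hdrop oldD (by decide), ih]
  | case3 c t hany ih =>
    rw [scanCdn, if_neg hany]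
    rw [cdnOlds_eq] at hany
    simp only [List.any_cons, List.any_nil, Bool.or_false, Bool.or_eq_true,
      List.isPrefixOf_iff_prefix, not_or] at hany
    obtain ⟨hA, hB, hC, hD⟩ := hany
    rw [rep1_cons_neg oldA cdnNew c t hA,
        rep1_cons_neg oldB cdnNew c _ (not_prefix_cons_rep1 oldA cdnNew oldB lenB nov_B c t hB),
        rep1_cons_neg oldC cdnNew c _
          (not_prefix_cons_rep1 oldB cdnNew oldC lenC nov_C c _
            (not_prefix_cons_rep1 oldA cdnNew oldC lenC nov_C c t hC)),
        rep1_cons_neg oldD cdnNew c _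
          (not_prefix_cons_rep1 oldC cdnNew oldD lenD nov_D c _
            (not_prefix_cons_rep1 oldB cdnNew oldD lenD nov_D c _
              (not_prefix_cons_rep1 oldA cdnNew oldD lenD nov_D c t hD))),
        ih]

-- the A-side fold of four string replaces produces exactly the scanned char list
theorem fold_toList (s : String) :
    (cdnReplacements.foldl (fun u p => PySem.Str.replace u p.1 p.2) s).toList = scanCdn s.toList := by
  simp only [cdnReplacements, List.foldl_cons, List.foldl_nil, PySem.Str.toList_replace]
  rw [replace_eq_rep1 _ _ _ (by decide), replace_eq_rep1 _ _ _ (by decide),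
      replace_eq_rep1 _ _ _ (by decide), replace_eq_rep1 _ _ _ (by decide)]
  exact scan_eq s.toList

-- ===== VERDICT (by name: the statement is the Claim_ definition above) =====
theorem convert_cdn_spec : Claim_equal_convert_cdn := by
  intro url _
  unfold Spec_convert_cdn convert_cdn convert_cdn_alt
  cases url with
  | none => rfl
  | some s =>
    by_cases hs : s = ""
    · simp [hs]
    · simp only [if_neg hs, Option.some.injEq, PySem.Str.strip]
      rw [fold_toList s]
      simp
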